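-- pv_equiv track=rewrite | github.com/talgreen1/python-poster-mockup | tests/test_permutations.py | find_list_with_most_uniques
-- ===== SOURCE A (Python) =====
-- import collections
--
-- def find_list_with_most_uniques(list_of_lists):
--     num_of_uniques_map = {}
--     for lst in list_of_lists:
--         num_of_uniques = len(set(lst))
--         num_of_uniques_map[num_of_uniques] = lst
--     a = collections.OrderedDict(sorted(num_of_uniques_map.items()))
--     (_, res) =  next(reversed(a.items()))
--     return res
-- ===== SOURCE B (Python) =====
-- def find_list_with_most_uniques(list_of_lists):
--     it = iter(list_of_lists)
--     best = next(it)
--     best_count = len(set(best))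
--     for lst in it:
--         c = len(set(lst))
--         if c >= best_count:
--             best, best_count = lst, c
--     return best
-- ===== Notes on version B (the rewrite author's own statement) =====
-- stated objective: simpler
-- what changed: Replaced the count->list dict plus full sort-and-take-last with a single streaming running-max pass (>= keeps last on ties); same empty-input StopIteration via next(iter(...)).
import Mathlib
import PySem

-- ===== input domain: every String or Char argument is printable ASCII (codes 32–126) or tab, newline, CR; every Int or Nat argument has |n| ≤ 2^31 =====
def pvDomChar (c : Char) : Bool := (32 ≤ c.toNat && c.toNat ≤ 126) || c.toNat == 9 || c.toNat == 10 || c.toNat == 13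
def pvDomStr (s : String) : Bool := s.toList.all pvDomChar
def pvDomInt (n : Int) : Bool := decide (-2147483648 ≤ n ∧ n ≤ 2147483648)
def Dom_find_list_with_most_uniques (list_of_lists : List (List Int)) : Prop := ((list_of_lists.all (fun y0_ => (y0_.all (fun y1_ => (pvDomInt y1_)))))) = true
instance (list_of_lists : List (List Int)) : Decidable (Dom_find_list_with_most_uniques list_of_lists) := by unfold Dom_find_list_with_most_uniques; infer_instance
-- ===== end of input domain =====

-- B replaces A's count->list dict plus sort-and-take-last with one streaming running-max pass
-- (>= keeps the last list on ties); equal on every nonempty input (simpler decomposition).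


-- ===== PORT A =====
def find_list_with_most_uniques (list_of_lists : List (List Int)) : List Int :=
  let num_of_uniques_map : PySem.Dict Int (List Int) :=
    list_of_lists.foldl
      (fun d lst => d.insert ((PySem.Set.ofList lst).length : Int) lst)
      PySem.Dict.empty
  -- Python sorts the (int, list) item tuples; the dict's keys are distinct, so the
  -- comparison is decided by the key alone — sorting by fst is exact here
  let a := PySem.List.sorted num_of_uniques_map.items (fun p => p.1) false
  -- next(reversed(a.items())) = last item; on an empty dict Python raises StopIteration
  -- (excluded by Pre_), so the default is never used
  ((a.getLast?).getD (0, [])).2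

-- ===== PORT B =====
def find_list_with_most_uniques_alt (list_of_lists : List (List Int)) : List Int :=
  match list_of_lists with
  | [] => []   -- next(it) raises StopIteration here; excluded by Pre_
  | best :: rest =>
    (rest.foldl
      (fun st lst =>
        let c : Int := (PySem.Set.ofList lst).length
        if c ≥ st.2 then (lst, c) else st)
      (best, ((PySem.Set.ofList best).length : Int))).1

-- ===== PRECONDITION & SPEC =====
-- Pre_ excludes exactly the empty list, on which both Pythons raise StopIteration.
def Pre_find_list_with_most_uniques (list_of_lists : List (List Int)) : Prop :=
  list_of_lists ≠ []
instance (list_of_lists : List (List Int)) : Decidable (Pre_find_list_with_most_uniques list_of_lists) := by unfold Pre_find_list_with_most_uniques; infer_instance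
def pvWitness_find_list_with_most_uniques : List (List Int) := [[1, 2, 2], [3]]

def Spec_find_list_with_most_uniques (list_of_lists : List (List Int)) (out : List Int) : Prop := out = find_list_with_most_uniques_alt list_of_lists
instance (list_of_lists : List (List Int)) (out : List Int) : Decidable (Spec_find_list_with_most_uniques list_of_lists out) := by unfold Spec_find_list_with_most_uniques; infer_instance

-- ===== CLAIM (what is proved, stated in full; the proofs are below) =====
def Claim_equal_find_list_with_most_uniques : Prop := ∀ (list_of_lists : List (List Int)), Dom_find_list_with_most_uniques list_of_lists → Pre_find_list_with_most_uniques list_of_lists → Spec_find_list_with_most_uniques list_of_lists (find_list_with_most_uniques list_of_lists)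

-- ===== LEMMAS AND PROOFS =====

-- len(set(l)) as an Int
def pvU (l : List Int) : Int := ((PySem.Set.ofList l).length : Int)

-- the dict A builds
def pvDict (xs : List (List Int)) : PySem.Dict Int (List Int) :=
  xs.foldl (fun d lst => d.insert (pvU lst) lst) PySem.Dict.empty

-- B's running state
def pvSt (t : List (List Int)) (h : List Int) : List Int × Int :=
  t.foldl (fun st lst => if pvU lst ≥ st.2 then (lst, pvU lst) else st) (h, pvU h)

lemma pvDict_nodup_keys (xs : List (List Int)) : (pvDict xs).keys.Nodup := by
  unfold pvDict
  exact PySem.Dict.nodup_keys_foldl_insert_key xs pvU (fun _ lst => lst) _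
    PySem.Dict.nodup_keys_empty

lemma pvDict_snoc (xs : List (List Int)) (l : List Int) :
    pvDict (xs ++ [l]) = (pvDict xs).insert (pvU l) l := by
  unfold pvDict; rw [List.foldl_append]; rfl

-- B's state (b, c) satisfies: c = u b, d maps c to b, and c bounds every key of d.
lemma pvMain (t : List (List Int)) (h : List Int) :
    (pvSt t h).2 = pvU (pvSt t h).1 ∧
    (pvDict (h :: t)).get? (pvSt t h).2 = some (pvSt t h).1 ∧
    ∀ k ∈ (pvDict (h :: t)).keys, k ≤ (pvSt t h).2 := by
  induction t using List.reverseRecOn with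
  | nil =>
    refine ⟨rfl, ?_, ?_⟩
    · show (PySem.Dict.empty.insert (pvU h) h).get? (pvU h) = some h
      exact PySem.Dict.get?_insert_self _ _ _
    · intro k hk
      have : k ∈ (PySem.Dict.empty : PySem.Dict Int (List Int)).keys ++ [pvU h] := by
        rwa [← PySem.Dict.keys_insert_of_not_contains (d := PySem.Dict.empty) (v := h) (by simp)]
      simp [PySem.Dict.keys_empty] at this
      simp [this, pvSt]
  | append_singleton t l ih =>
    obtain ⟨ih1, ih2, ih3⟩ := ih
    have hst : pvSt (t ++ [l]) h
        = if pvU l ≥ (pvSt t h).2 then (l, pvU l) else pvSt t h := by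
      unfold pvSt; rw [List.foldl_append]; rfl
    have hd : pvDict (h :: (t ++ [l])) = (pvDict (h :: t)).insert (pvU l) l := by
      have : h :: (t ++ [l]) = (h :: t) ++ [l] := by simp
      rw [this, pvDict_snoc]
    by_cases hc : pvU l ≥ (pvSt t h).2
    · rw [hst, if_pos hc, hd]
      refine ⟨rfl, PySem.Dict.get?_insert_self _ _ _, ?_⟩
      intro k hk
      rcases (PySem.Dict.mem_keys_insert _ _ _ _).1 hk with rfl | hk'
      · exact le_refl _
      · exact le_trans (ih3 k hk') hc
    · rw [hst, if_neg hc, hd]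
      have hlt : pvU l < (pvSt t h).2 := lt_of_not_ge hc
      refine ⟨ih1, ?_, ?_⟩
      · rw [PySem.Dict.get?_insert_of_ne _ _ (ne_of_gt hlt)]
        exact ih2
      · intro k hk
        rcases (PySem.Dict.mem_keys_insert _ _ _ _).1 hk with rfl | hk'
        · exact le_of_lt hlt
        · exact ih3 k hk'

-- the last element of the key-sorted items is the entry at the maximal key
lemma pvLastSorted {d : PySem.Dict Int (List Int)} {k : Int} {v : List Int}
    (hnd : d.keys.Nodup) (hget : d.get? k = some v)
    (hmax : ∀ k' ∈ d.keys, k' ≤ k) :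
    (PySem.List.sorted d.items (fun p => p.1) false).getLast? = some (k, v) := by
  have hm : (k, v) ∈ d.items := PySem.Dict.mem_items_of_get?_eq_some _ hget
  have hperm : (PySem.List.sorted d.items (fun p => p.1) false).Perm d.items :=
    PySem.List.sorted_perm _ _ _
  have hmems : (k, v) ∈ PySem.List.sorted d.items (fun p => p.1) false :=
    (PySem.List.mem_sorted _ _ _ _).2 hm
  have hp : (PySem.List.sorted d.items (fun p => p.1) false).Pairwise
      (fun a b => a.1 ≤ b.1) := PySem.List.sorted_pairwise _ _
  have hndmap : ((PySem.List.sorted d.items (fun p => p.1) false).map Prod.fst).Nodup := by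
    have : d.items.map Prod.fst = d.keys := rfl
    exact ((hperm.map Prod.fst).nodup_iff).2 (this ▸ hnd)
  rcases List.eq_nil_or_concat (PySem.List.sorted d.items (fun p => p.1) false) with hnil | ⟨ys, z, hcat⟩
  · rw [hnil] at hmems; simp at hmems
  · rw [List.concat_eq_append] at hcat
    rw [hcat, List.getLast?_concat]
    have hz_mem : z ∈ PySem.List.sorted d.items (fun p => p.1) false := by
      rw [hcat]; simp
    have hz_items : z ∈ d.items := hperm.mem_iff.1 hz_mem
    have hz_le : z.1 ≤ k := hmax z.1 (PySem.Dict.mem_keys_of_mem_items _ hz_items)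
    have hz1 : z.1 = k := by
      rw [hcat] at hmems
      rcases List.mem_append.1 hmems with hy | hz
      · -- (k, v) sits in ys, so k ≤ z.1 by pairwise; with hz_le, z.1 = k
        rw [hcat] at hp
        have := (List.pairwise_append.1 hp).2.2 (k, v) hy z (by simp)
        exact le_antisymm hz_le this
      · simp at hz; rw [← hz]
    -- keys are distinct, so the element with key k is unique
    have : z = (k, v) := by
      have hinj := List.inj_on_of_nodup_map hndmap
      exact hinj hz_mem hmems (by rw [hz1])
    rw [this]

-- ===== VERDICT (by name: the statement is the Claim_ definition above) =====
theorem find_list_with_most_uniques_spec : Claim_equal_find_list_with_most_uniques := by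
  intro xs _ hpre
  unfold Spec_find_list_with_most_uniques
  cases xs with
  | nil => exact absurd rfl hpre
  | cons h t =>
    obtain ⟨h1, h2, h3⟩ := pvMain t h
    have hA : find_list_with_most_uniques (h :: t)
        = (((PySem.List.sorted (pvDict (h :: t)).items (fun p => p.1) false).getLast?).getD (0, [])).2 := rfl
    have hB : find_list_with_most_uniques_alt (h :: t) = (pvSt t h).1 := rfl
    rw [hA, hB, pvLastSorted (pvDict_nodup_keys _) h2 h3]
    rfl
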